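-- pv_equiv track=rewrite | github.com/pypi-data/pypi-mirror-383 | packages/dana/dana-0.6.0.1-py3-none-any.whl/dana/api/services/agent_generator.py | _generate_simple_fallback_agent
-- ===== SOURCE A (Python) =====
-- from typing import Any
--
-- def _generate_simple_fallback_agent(messages: list[dict[str, Any]]) -> str:
--     """
--     Generate a simple fallback agent based on user messages.
--
--     Args:
--         messages: List of conversation messages
--
--     Returns:
--         Simple Dana agent code
--     """
--     # Extract user intention from messages
--     all_content = ""
--     for msg in messages:
--         if msg.get("role") == "user":
--             all_content = all_content + " " + msg.get("content", "")
--
--     content_lower = all_content.lower()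
--
--     # Determine agent type based on keywords
--     if "weather" in content_lower:
--         agent_name = "WeatherAgent"
--         agent_title = "Weather Information Agent"
--         description = "Provides weather information and recommendations"
--     elif "help" in content_lower or "assistant" in content_lower:
--         agent_name = "AssistantAgent"
--         agent_title = "General Assistant Agent"
--         description = "A helpful assistant that can answer questions and provide guidance"
--     elif "data" in content_lower or "analysis" in content_lower:
--         agent_name = "DataAgent"
--         agent_title = "Data Analysis Agent"
--         description = "Analyzes data and provides insights"
--     elif "email" in content_lower or "mail" in content_lower:
--         agent_name = "EmailAgent"
--         agent_title = "Email Assistant Agent"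
--         description = "Helps with email composition and management"
--     elif "calendar" in content_lower or "schedule" in content_lower:
--         agent_name = "CalendarAgent"
--         agent_title = "Calendar Assistant Agent"
--         description = "Helps with calendar management and scheduling"
--     elif "document" in content_lower or "file" in content_lower:
--         agent_name = "DocumentAgent"
--         agent_title = "Document Processing Agent"
--         description = "Processes and analyzes documents and files"
--     elif "knowledge" in content_lower or "research" in content_lower:
--         agent_name = "KnowledgeAgent"
--         agent_title = "Knowledge and Research Agent"
--         description = "Provides information and research capabilities"
--     elif "question" in content_lower or "answer" in content_lower:
--         agent_name = "QuestionAgent"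
--         agent_title = "Question Answering Agent"
--         description = "Answers questions on various topics"
--     elif "finance" in content_lower or "money" in content_lower or "budget" in content_lower or "investment" in content_lower:
--         agent_name = "FinanceAgent"
--         agent_title = "Personal Finance Advisor Agent"
--         description = "Provides personal finance advice, budgeting tips, and investment guidance"
--     else:
--         agent_name = "CustomAgent"
--         agent_title = "Custom Assistant Agent"
--         description = "An agent that can help with various tasks"
--
--     return f'''"""Simple {agent_title}."""
--
-- # Agent Card declaration
-- agent {agent_name}:
--     name : str = "{agent_title}"
--     description : str = "{description}"
--     resources : list = []
--
-- # Agent's problem solver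
-- def solve({agent_name.lower()} : {agent_name}, problem : str):
--     return reason(f"Help me with: {{problem}}")
--
-- # Use solve() in your application
-- # example_input = "Hello, how can you help me?"
-- # response = solve({agent_name}(), example_input)'''
-- ===== SOURCE B (Python) =====
-- # B: inverted keyword->priority index + minimal-matching-priority selection,
-- # instead of A's ordered nine-branch if/elif first-match chain.
--
-- KEYWORD_PRIORITY = {
--     "weather": 0,
--     "help": 1, "assistant": 1,
--     "data": 2, "analysis": 2,
--     "email": 3, "mail": 3,
--     "calendar": 4, "schedule": 4,
--     "document": 5, "file": 5,
--     "knowledge": 6, "research": 6,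
--     "question": 7, "answer": 7,
--     "finance": 8, "money": 8, "budget": 8, "investment": 8,
-- }
--
-- ENTRIES = [
--     ("WeatherAgent", "Weather Information Agent",
--      "Provides weather information and recommendations"),
--     ("AssistantAgent", "General Assistant Agent",
--      "A helpful assistant that can answer questions and provide guidance"),
--     ("DataAgent", "Data Analysis Agent",
--      "Analyzes data and provides insights"),
--     ("EmailAgent", "Email Assistant Agent",
--      "Helps with email composition and management"),
--     ("CalendarAgent", "Calendar Assistant Agent",
--      "Helps with calendar management and scheduling"),
--     ("DocumentAgent", "Document Processing Agent",
--      "Processes and analyzes documents and files"),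
--     ("KnowledgeAgent", "Knowledge and Research Agent",
--      "Provides information and research capabilities"),
--     ("QuestionAgent", "Question Answering Agent",
--      "Answers questions on various topics"),
--     ("FinanceAgent", "Personal Finance Advisor Agent",
--      "Provides personal finance advice, budgeting tips, and investment guidance"),
--     ("CustomAgent", "Custom Assistant Agent",
--      "An agent that can help with various tasks"),
-- ]
--
--
-- def _generate_simple_fallback_agent(messages):
--     content_lower = "".join(
--         " " + msg.get("content", "") for msg in messages if msg.get("role") == "user"
--     ).lower()
--     idx = 9  # default: CustomAgent
--     for kw, prio in KEYWORD_PRIORITY.items():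
--         if kw in content_lower:
--             idx = min(idx, prio)
--     agent_name, agent_title, description = ENTRIES[idx]
--     return f'''"""Simple {agent_title}."""
--
-- # Agent Card declaration
-- agent {agent_name}:
--     name : str = "{agent_title}"
--     description : str = "{description}"
--     resources : list = []
--
-- # Agent's problem solver
-- def solve({agent_name.lower()} : {agent_name}, problem : str):
--     return reason(f"Help me with: {{problem}}")
--
-- # Use solve() in your application
-- # example_input = "Hello, how can you help me?"
-- # response = solve({agent_name}(), example_input)'''
-- ===== Notes on version B (the rewrite author's own statement) =====
-- stated objective: alternative
-- what changed: Replaces A's ordered nine-branch if/elif first-match chain by an inverted keyword->priority dictionary: one loop over all keywords computes the minimal matching priority, which indexes a flat entries table (index 9 = Custom default); the user-content accumulation becomes a join over a filtered comprehension.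
import Mathlib
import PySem

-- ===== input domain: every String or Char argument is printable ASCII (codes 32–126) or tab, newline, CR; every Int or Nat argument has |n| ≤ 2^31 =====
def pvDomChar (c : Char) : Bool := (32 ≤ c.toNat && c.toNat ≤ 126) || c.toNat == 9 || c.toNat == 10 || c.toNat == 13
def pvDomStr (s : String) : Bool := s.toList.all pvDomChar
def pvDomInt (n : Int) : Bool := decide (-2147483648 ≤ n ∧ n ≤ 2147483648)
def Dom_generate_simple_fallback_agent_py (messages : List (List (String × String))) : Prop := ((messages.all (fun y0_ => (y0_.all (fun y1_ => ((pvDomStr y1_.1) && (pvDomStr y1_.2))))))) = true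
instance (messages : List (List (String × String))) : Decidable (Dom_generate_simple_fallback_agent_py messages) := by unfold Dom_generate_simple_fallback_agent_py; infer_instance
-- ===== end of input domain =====

-- B replaces A's ordered if/elif first-match chain by an inverted keyword->priority map:
-- one loop computes the minimal matching priority, indexing a flat entries table (alternative structure, same cost).

-- ===== PORT A =====
-- literal transliteration of A: accumulate " " + content over user messages, lower,
-- then the if/elif chain, then the f-string.
def generate_simple_fallback_agent_py (messages : List (List (String × String))) : String :=
  let all_content := messages.foldl (fun all_content msg =>
    if (PySem.Dict.mk msg).get? "role" == some "user" then
      all_content ++ " " ++ (PySem.Dict.mk msg).getD "content" ""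
    else all_content) ""
  let content_lower := PySem.Str.lower all_content
  let t : String × String × String :=
    if PySem.Str.isIn "weather" content_lower then
      ("WeatherAgent", "Weather Information Agent", "Provides weather information and recommendations")
    else if PySem.Str.isIn "help" content_lower || PySem.Str.isIn "assistant" content_lower then
      ("AssistantAgent", "General Assistant Agent", "A helpful assistant that can answer questions and provide guidance")
    else if PySem.Str.isIn "data" content_lower || PySem.Str.isIn "analysis" content_lower then
      ("DataAgent", "Data Analysis Agent", "Analyzes data and provides insights")
    else if PySem.Str.isIn "email" content_lower || PySem.Str.isIn "mail" content_lower then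
      ("EmailAgent", "Email Assistant Agent", "Helps with email composition and management")
    else if PySem.Str.isIn "calendar" content_lower || PySem.Str.isIn "schedule" content_lower then
      ("CalendarAgent", "Calendar Assistant Agent", "Helps with calendar management and scheduling")
    else if PySem.Str.isIn "document" content_lower || PySem.Str.isIn "file" content_lower then
      ("DocumentAgent", "Document Processing Agent", "Processes and analyzes documents and files")
    else if PySem.Str.isIn "knowledge" content_lower || PySem.Str.isIn "research" content_lower then
      ("KnowledgeAgent", "Knowledge and Research Agent", "Provides information and research capabilities")
    else if PySem.Str.isIn "question" content_lower || PySem.Str.isIn "answer" content_lower then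
      ("QuestionAgent", "Question Answering Agent", "Answers questions on various topics")
    else if PySem.Str.isIn "finance" content_lower || PySem.Str.isIn "money" content_lower || PySem.Str.isIn "budget" content_lower || PySem.Str.isIn "investment" content_lower then
      ("FinanceAgent", "Personal Finance Advisor Agent", "Provides personal finance advice, budgeting tips, and investment guidance")
    else
      ("CustomAgent", "Custom Assistant Agent", "An agent that can help with various tasks")
  let agent_name := t.1
  let agent_title := t.2.1
  let description := t.2.2
  "\"\"\"Simple " ++ agent_title ++ ".\"\"\"\n\n# Agent Card declaration\nagent " ++ agent_name ++ ":\n    name : str = \"" ++ agent_title ++ "\"\n    description : str = \"" ++ description ++ "\"\n    resources : list = []\n\n# Agent's problem solver\ndef solve(" ++ PySem.Str.lower agent_name ++ " : " ++ agent_name ++ ", problem : str):\n    return reason(f\"Help me with: {problem}\")\n\n# Use solve() in your application\n# example_input = \"Hello, how can you help me?\"\n# response = solve(" ++ agent_name ++ "(), example_input)"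

-- ===== PORT B =====
-- KEYWORD_PRIORITY dict, iterated in insertion order
def pvKeywordPriority : List (String × Nat) :=
  [ ("weather", 0),
    ("help", 1), ("assistant", 1),
    ("data", 2), ("analysis", 2),
    ("email", 3), ("mail", 3),
    ("calendar", 4), ("schedule", 4),
    ("document", 5), ("file", 5),
    ("knowledge", 6), ("research", 6),
    ("question", 7), ("answer", 7),
    ("finance", 8), ("money", 8), ("budget", 8), ("investment", 8) ]

-- ENTRIES table; index 9 is the Custom default
def pvEntries : List (String × String × String) :=
  [ ("WeatherAgent", "Weather Information Agent", "Provides weather information and recommendations"),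
    ("AssistantAgent", "General Assistant Agent", "A helpful assistant that can answer questions and provide guidance"),
    ("DataAgent", "Data Analysis Agent", "Analyzes data and provides insights"),
    ("EmailAgent", "Email Assistant Agent", "Helps with email composition and management"),
    ("CalendarAgent", "Calendar Assistant Agent", "Helps with calendar management and scheduling"),
    ("DocumentAgent", "Document Processing Agent", "Processes and analyzes documents and files"),
    ("KnowledgeAgent", "Knowledge and Research Agent", "Provides information and research capabilities"),
    ("QuestionAgent", "Question Answering Agent", "Answers questions on various topics"),
    ("FinanceAgent", "Personal Finance Advisor Agent", "Provides personal finance advice, budgeting tips, and investment guidance"),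
    ("CustomAgent", "Custom Assistant Agent", "An agent that can help with various tasks") ]

def generate_simple_fallback_agent_py_alt (messages : List (List (String × String))) : String :=
  let content_lower := PySem.Str.lower (PySem.Str.join ""
    ((messages.filter (fun msg => (PySem.Dict.mk msg).get? "role" == some "user")).map
      (fun msg => " " ++ (PySem.Dict.mk msg).getD "content" "")))
  let idx := pvKeywordPriority.foldl (fun idx p =>
    if PySem.Str.isIn p.1 content_lower then min idx p.2 else idx) 9
  let e := pvEntries.getD idx ("", "", "")
  let agent_name := e.1
  let agent_title := e.2.1
  let description := e.2.2
  "\"\"\"Simple " ++ agent_title ++ ".\"\"\"\n\n# Agent Card declaration\nagent " ++ agent_name ++ ":\n    name : str = \"" ++ agent_title ++ "\"\n    description : str = \"" ++ description ++ "\"\n    resources : list = []\n\n# Agent's problem solver\ndef solve(" ++ PySem.Str.lower agent_name ++ " : " ++ agent_name ++ ", problem : str):\n    return reason(f\"Help me with: {problem}\")\n\n# Use solve() in your application\n# example_input = \"Hello, how can you help me?\"\n# response = solve(" ++ agent_name ++ "(), example_input)"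

-- ===== PRECONDITION & SPEC =====
def Spec_generate_simple_fallback_agent_py (messages : List (List (String × String))) (out : String) : Prop := out = generate_simple_fallback_agent_py_alt messages
instance (messages : List (List (String × String))) (out : String) : Decidable (Spec_generate_simple_fallback_agent_py messages out) := by unfold Spec_generate_simple_fallback_agent_py; infer_instance

-- ===== CLAIM (what is proved, stated in full; the proofs are below) =====
def Claim_equal_generate_simple_fallback_agent_py : Prop := ∀ (messages : List (List (String × String))), Dom_generate_simple_fallback_agent_py messages → Spec_generate_simple_fallback_agent_py messages (generate_simple_fallback_agent_py messages)

-- ===== LEMMAS AND PROOFS =====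

-- "".join of a cons concatenates head and the join of the tail
theorem pv_join_nil_cons (x : String) (xs : List String) :
    PySem.Str.join "" (x :: xs) = x ++ PySem.Str.join "" xs := by
  apply String.toList_injective
  simp only [PySem.Str.toList_join, String.toList_append, PySem.Chars.join, List.intercalate,
    List.map_cons]
  cases xs <;> simp

-- A's accumulating loop equals acc ++ "".join(map over filter)
theorem pv_content_eq (l : List (List (String × String))) (acc : String) :
    l.foldl (fun all_content msg =>
      if (PySem.Dict.mk msg).get? "role" == some "user" then
        all_content ++ " " ++ (PySem.Dict.mk msg).getD "content" ""
      else all_content) acc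
    = acc ++ PySem.Str.join ""
        ((l.filter (fun msg => (PySem.Dict.mk msg).get? "role" == some "user")).map
          (fun msg => " " ++ (PySem.Dict.mk msg).getD "content" "")) := by
  induction l generalizing acc with
  | nil => simp [PySem.Str.join, PySem.Chars.join, List.intercalate]
  | cons m t ih =>
    simp only [List.foldl_cons, List.filter_cons]
    by_cases h : ((PySem.Dict.mk m).get? "role" == some "user") = true
    · simp only [h, if_pos, List.map_cons, pv_join_nil_cons, ih]
      rw [String.append_assoc, String.append_assoc, String.append_assoc]
    · simp only [h, Bool.false_eq_true, if_false, ih]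

-- once the running minimum i is ≤ every remaining priority, the loop keeps it
theorem pv_fold_absorb (cl : String) (i : Nat) (ps : List (String × Nat))
    (h : ∀ p ∈ ps, i ≤ p.2) :
    ps.foldl (fun idx p => if PySem.Str.isIn p.1 cl then min idx p.2 else idx) i = i := by
  induction ps with
  | nil => rfl
  | cons q t ih =>
    simp only [List.foldl_cons]
    have h1 : min i q.2 = i := Nat.min_eq_left (h q (List.mem_cons_self))
    have : (if PySem.Str.isIn q.1 cl then min i q.2 else i) = i := by
      rw [h1]; exact ite_self i
    rw [this]
    exact ih (fun p hp => h p (List.mem_cons_of_mem _ hp))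

-- A's if/elif chain picks exactly the entry at the minimal matching priority
set_option maxHeartbeats 4000000 in
theorem pv_select_eq (cl : String) :
    (if PySem.Str.isIn "weather" cl then
      ("WeatherAgent", "Weather Information Agent", "Provides weather information and recommendations")
    else if PySem.Str.isIn "help" cl || PySem.Str.isIn "assistant" cl then
      ("AssistantAgent", "General Assistant Agent", "A helpful assistant that can answer questions and provide guidance")
    else if PySem.Str.isIn "data" cl || PySem.Str.isIn "analysis" cl then
      ("DataAgent", "Data Analysis Agent", "Analyzes data and provides insights")
    else if PySem.Str.isIn "email" cl || PySem.Str.isIn "mail" cl then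
      ("EmailAgent", "Email Assistant Agent", "Helps with email composition and management")
    else if PySem.Str.isIn "calendar" cl || PySem.Str.isIn "schedule" cl then
      ("CalendarAgent", "Calendar Assistant Agent", "Helps with calendar management and scheduling")
    else if PySem.Str.isIn "document" cl || PySem.Str.isIn "file" cl then
      ("DocumentAgent", "Document Processing Agent", "Processes and analyzes documents and files")
    else if PySem.Str.isIn "knowledge" cl || PySem.Str.isIn "research" cl then
      ("KnowledgeAgent", "Knowledge and Research Agent", "Provides information and research capabilities")
    else if PySem.Str.isIn "question" cl || PySem.Str.isIn "answer" cl then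
      ("QuestionAgent", "Question Answering Agent", "Answers questions on various topics")
    else if PySem.Str.isIn "finance" cl || PySem.Str.isIn "money" cl || PySem.Str.isIn "budget" cl || PySem.Str.isIn "investment" cl then
      ("FinanceAgent", "Personal Finance Advisor Agent", "Provides personal finance advice, budgeting tips, and investment guidance")
    else
      ("CustomAgent", "Custom Assistant Agent", "An agent that can help with various tasks"))
    = pvEntries.getD
        (pvKeywordPriority.foldl (fun idx p =>
          if PySem.Str.isIn p.1 cl then min idx p.2 else idx) 9)
        ("", "", "") := by
  split_ifs with h1 h2 h3 h4 h5 h6 h7 h8 h9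
  · have hf : List.foldl (fun idx p => if PySem.Str.isIn p.1 cl then min idx p.2 else idx) 9 pvKeywordPriority = 0 := by
      have hsplit : pvKeywordPriority = [("weather", 0)] ++ [("help", 1), ("assistant", 1), ("data", 2), ("analysis", 2), ("email", 3), ("mail", 3), ("calendar", 4), ("schedule", 4), ("document", 5), ("file", 5), ("knowledge", 6), ("research", 6), ("question", 7), ("answer", 7), ("finance", 8), ("money", 8), ("budget", 8), ("investment", 8)] := rfl
      rw [hsplit, List.foldl_append]
      have hpre : List.foldl (fun idx p => if PySem.Str.isIn p.1 cl then min idx p.2 else idx) 9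
          [("weather", 0)] = 0 := by
        by_cases m0 : PySem.Str.isIn "weather" cl = true <;> simp_all
      rw [hpre]
      exact pv_fold_absorb cl 0 _ (by decide)
    rw [hf]; rfl
  · have hf : List.foldl (fun idx p => if PySem.Str.isIn p.1 cl then min idx p.2 else idx) 9 pvKeywordPriority = 1 := by
      have hsplit : pvKeywordPriority = [("weather", 0), ("help", 1), ("assistant", 1)] ++ [("data", 2), ("analysis", 2), ("email", 3), ("mail", 3), ("calendar", 4), ("schedule", 4), ("document", 5), ("file", 5), ("knowledge", 6), ("research", 6), ("question", 7), ("answer", 7), ("finance", 8), ("money", 8), ("budget", 8), ("investment", 8)] := rfl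
      rw [hsplit, List.foldl_append]
      have hpre : List.foldl (fun idx p => if PySem.Str.isIn p.1 cl then min idx p.2 else idx) 9
          [("weather", 0), ("help", 1), ("assistant", 1)] = 1 := by
        by_cases m0 : PySem.Str.isIn "help" cl = true <;>
      by_cases m1 : PySem.Str.isIn "assistant" cl = true <;> simp_all
      rw [hpre]
      exact pv_fold_absorb cl 1 _ (by decide)
    rw [hf]; rfl
  · have hf : List.foldl (fun idx p => if PySem.Str.isIn p.1 cl then min idx p.2 else idx) 9 pvKeywordPriority = 2 := by
      have hsplit : pvKeywordPriority = [("weather", 0), ("help", 1), ("assistant", 1), ("data", 2), ("analysis", 2)] ++ [("email", 3), ("mail", 3), ("calendar", 4), ("schedule", 4), ("document", 5), ("file", 5), ("knowledge", 6), ("research", 6), ("question", 7), ("answer", 7), ("finance", 8), ("money", 8), ("budget", 8), ("investment", 8)] := rfl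
      rw [hsplit, List.foldl_append]
      have hpre : List.foldl (fun idx p => if PySem.Str.isIn p.1 cl then min idx p.2 else idx) 9
          [("weather", 0), ("help", 1), ("assistant", 1), ("data", 2), ("analysis", 2)] = 2 := by
        by_cases m0 : PySem.Str.isIn "data" cl = true <;>
      by_cases m1 : PySem.Str.isIn "analysis" cl = true <;> simp_all
      rw [hpre]
      exact pv_fold_absorb cl 2 _ (by decide)
    rw [hf]; rfl
  · have hf : List.foldl (fun idx p => if PySem.Str.isIn p.1 cl then min idx p.2 else idx) 9 pvKeywordPriority = 3 := by
      have hsplit : pvKeywordPriority = [("weather", 0), ("help", 1), ("assistant", 1), ("data", 2), ("analysis", 2), ("email", 3), ("mail", 3)] ++ [("calendar", 4), ("schedule", 4), ("document", 5), ("file", 5), ("knowledge", 6), ("research", 6), ("question", 7), ("answer", 7), ("finance", 8), ("money", 8), ("budget", 8), ("investment", 8)] := rfl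
      rw [hsplit, List.foldl_append]
      have hpre : List.foldl (fun idx p => if PySem.Str.isIn p.1 cl then min idx p.2 else idx) 9
          [("weather", 0), ("help", 1), ("assistant", 1), ("data", 2), ("analysis", 2), ("email", 3), ("mail", 3)] = 3 := by
        by_cases m0 : PySem.Str.isIn "email" cl = true <;>
      by_cases m1 : PySem.Str.isIn "mail" cl = true <;> simp_all
      rw [hpre]
      exact pv_fold_absorb cl 3 _ (by decide)
    rw [hf]; rfl
  · have hf : List.foldl (fun idx p => if PySem.Str.isIn p.1 cl then min idx p.2 else idx) 9 pvKeywordPriority = 4 := by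
      have hsplit : pvKeywordPriority = [("weather", 0), ("help", 1), ("assistant", 1), ("data", 2), ("analysis", 2), ("email", 3), ("mail", 3), ("calendar", 4), ("schedule", 4)] ++ [("document", 5), ("file", 5), ("knowledge", 6), ("research", 6), ("question", 7), ("answer", 7), ("finance", 8), ("money", 8), ("budget", 8), ("investment", 8)] := rfl
      rw [hsplit, List.foldl_append]
      have hpre : List.foldl (fun idx p => if PySem.Str.isIn p.1 cl then min idx p.2 else idx) 9
          [("weather", 0), ("help", 1), ("assistant", 1), ("data", 2), ("analysis", 2), ("email", 3), ("mail", 3), ("calendar", 4), ("schedule", 4)] = 4 := by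
        by_cases m0 : PySem.Str.isIn "calendar" cl = true <;>
      by_cases m1 : PySem.Str.isIn "schedule" cl = true <;> simp_all
      rw [hpre]
      exact pv_fold_absorb cl 4 _ (by decide)
    rw [hf]; rfl
  · have hf : List.foldl (fun idx p => if PySem.Str.isIn p.1 cl then min idx p.2 else idx) 9 pvKeywordPriority = 5 := by
      have hsplit : pvKeywordPriority = [("weather", 0), ("help", 1), ("assistant", 1), ("data", 2), ("analysis", 2), ("email", 3), ("mail", 3), ("calendar", 4), ("schedule", 4), ("document", 5), ("file", 5)] ++ [("knowledge", 6), ("research", 6), ("question", 7), ("answer", 7), ("finance", 8), ("money", 8), ("budget", 8), ("investment", 8)] := rfl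
      rw [hsplit, List.foldl_append]
      have hpre : List.foldl (fun idx p => if PySem.Str.isIn p.1 cl then min idx p.2 else idx) 9
          [("weather", 0), ("help", 1), ("assistant", 1), ("data", 2), ("analysis", 2), ("email", 3), ("mail", 3), ("calendar", 4), ("schedule", 4), ("document", 5), ("file", 5)] = 5 := by
        by_cases m0 : PySem.Str.isIn "document" cl = true <;>
      by_cases m1 : PySem.Str.isIn "file" cl = true <;> simp_all
      rw [hpre]
      exact pv_fold_absorb cl 5 _ (by decide)
    rw [hf]; rfl
  · have hf : List.foldl (fun idx p => if PySem.Str.isIn p.1 cl then min idx p.2 else idx) 9 pvKeywordPriority = 6 := by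
      have hsplit : pvKeywordPriority = [("weather", 0), ("help", 1), ("assistant", 1), ("data", 2), ("analysis", 2), ("email", 3), ("mail", 3), ("calendar", 4), ("schedule", 4), ("document", 5), ("file", 5), ("knowledge", 6), ("research", 6)] ++ [("question", 7), ("answer", 7), ("finance", 8), ("money", 8), ("budget", 8), ("investment", 8)] := rfl
      rw [hsplit, List.foldl_append]
      have hpre : List.foldl (fun idx p => if PySem.Str.isIn p.1 cl then min idx p.2 else idx) 9
          [("weather", 0), ("help", 1), ("assistant", 1), ("data", 2), ("analysis", 2), ("email", 3), ("mail", 3), ("calendar", 4), ("schedule", 4), ("document", 5), ("file", 5), ("knowledge", 6), ("research", 6)] = 6 := by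
        by_cases m0 : PySem.Str.isIn "knowledge" cl = true <;>
      by_cases m1 : PySem.Str.isIn "research" cl = true <;> simp_all
      rw [hpre]
      exact pv_fold_absorb cl 6 _ (by decide)
    rw [hf]; rfl
  · have hf : List.foldl (fun idx p => if PySem.Str.isIn p.1 cl then min idx p.2 else idx) 9 pvKeywordPriority = 7 := by
      have hsplit : pvKeywordPriority = [("weather", 0), ("help", 1), ("assistant", 1), ("data", 2), ("analysis", 2), ("email", 3), ("mail", 3), ("calendar", 4), ("schedule", 4), ("document", 5), ("file", 5), ("knowledge", 6), ("research", 6), ("question", 7), ("answer", 7)] ++ [("finance", 8), ("money", 8), ("budget", 8), ("investment", 8)] := rfl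
      rw [hsplit, List.foldl_append]
      have hpre : List.foldl (fun idx p => if PySem.Str.isIn p.1 cl then min idx p.2 else idx) 9
          [("weather", 0), ("help", 1), ("assistant", 1), ("data", 2), ("analysis", 2), ("email", 3), ("mail", 3), ("calendar", 4), ("schedule", 4), ("document", 5), ("file", 5), ("knowledge", 6), ("research", 6), ("question", 7), ("answer", 7)] = 7 := by
        by_cases m0 : PySem.Str.isIn "question" cl = true <;>
      by_cases m1 : PySem.Str.isIn "answer" cl = true <;> simp_all
      rw [hpre]
      exact pv_fold_absorb cl 7 _ (by decide)
    rw [hf]; rfl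
  · have hf : List.foldl (fun idx p => if PySem.Str.isIn p.1 cl then min idx p.2 else idx) 9 pvKeywordPriority = 8 := by
      by_cases m0 : PySem.Str.isIn "finance" cl = true <;>
      by_cases m1 : PySem.Str.isIn "money" cl = true <;>
      by_cases m2 : PySem.Str.isIn "budget" cl = true <;>
      by_cases m3 : PySem.Str.isIn "investment" cl = true <;> simp_all [pvKeywordPriority]
    rw [hf]; rfl
  · have hf : List.foldl (fun idx p => if PySem.Str.isIn p.1 cl then min idx p.2 else idx) 9 pvKeywordPriority = 9 := by
      simp_all [pvKeywordPriority]
    rw [hf]; rfl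

-- ===== VERDICT (by name: the statement is the Claim_ definition above) =====
set_option maxHeartbeats 2000000 in
theorem generate_simple_fallback_agent_py_spec : Claim_equal_generate_simple_fallback_agent_py := by
  intro messages _
  unfold Spec_generate_simple_fallback_agent_py
  simp only [generate_simple_fallback_agent_py, generate_simple_fallback_agent_py_alt]
  rw [pv_content_eq, String.empty_append]
  generalize PySem.Str.lower (PySem.Str.join ""
    ((messages.filter (fun msg => (PySem.Dict.mk msg).get? "role" == some "user")).map
      (fun msg => " " ++ (PySem.Dict.mk msg).getD "content" ""))) = cl
  rw [pv_select_eq]
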